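-- pv_equiv track=rewrite | github.com/Arsen1302/Code-copy-detector | TestData/solutions/problem_1542_5.py | solution_1542_5
-- ===== SOURCE A (Python) =====
-- from typing import List
--
-- def solution_1542_5(nums: List[int]) -> int:
--     d={}
--     for i in range(len(nums)):
--         if abs(nums[i]) in d:
--             d[abs(nums[i])]=max(d[abs(nums[i])],nums[i])
--         else:
--             d[abs(nums[i])]=nums[i]
--     return d[min(d.keys())]
-- ===== SOURCE B (Python) =====
-- def solution_1542_5(nums):
--     m = min(abs(x) for x in nums)
--     return max(x for x in nums if abs(x) == m)
-- ===== Notes on version B (the rewrite author's own statement) =====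
-- stated objective: simpler
-- what changed: Drops the dict accumulator entirely: B computes the minimum absolute value in one scan and then the max over the elements attaining it in a second scan, no auxiliary table.
import Mathlib
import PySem

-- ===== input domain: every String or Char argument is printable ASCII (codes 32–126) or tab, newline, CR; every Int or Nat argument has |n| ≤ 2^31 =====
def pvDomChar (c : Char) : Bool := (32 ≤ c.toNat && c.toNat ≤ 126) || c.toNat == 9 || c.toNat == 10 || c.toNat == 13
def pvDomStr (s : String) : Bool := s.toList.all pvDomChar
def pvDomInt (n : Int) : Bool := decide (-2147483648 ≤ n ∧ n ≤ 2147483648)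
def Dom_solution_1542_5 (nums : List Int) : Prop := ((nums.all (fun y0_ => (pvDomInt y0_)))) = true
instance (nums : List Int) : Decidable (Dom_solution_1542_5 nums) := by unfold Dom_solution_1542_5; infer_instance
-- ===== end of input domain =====

-- B drops A's dict accumulator: it computes the minimum absolute value and then the max
-- of the elements attaining it (two plain scans, no table) — simpler, same cost.


-- ===== PORT A =====
-- the loop body of A: d[abs(v)] = max(d[abs(v)], v) if abs(v) in d else v
def pvStep (d : PySem.Dict Int Int) (v : Int) : PySem.Dict Int Int :=
  if d.contains |v| then d.insert |v| (max (d.getD |v| 0) v)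
  else d.insert |v| v

def solution_1542_5 (nums : List Int) : Int :=
  let d := (PySem.List.pyRange 0 (nums.length : Int) 1).foldl
    (fun d i => pvStep d (PySem.List.pyGetD nums i 0)) PySem.Dict.empty
  d.getD ((PySem.List.min? d.keys (fun y => y)).getD 0) 0

-- ===== PORT B =====
def solution_1542_5_alt (nums : List Int) : Int :=
  let m := (PySem.List.min? (nums.map (fun x => |x|)) (fun y => y)).getD 0
  (PySem.List.max? (nums.filter (fun x => |x| == m)) (fun y => y)).getD 0

-- ===== PRECONDITION & SPEC =====
-- Python A raises ValueError on the empty list (min of an empty dict's keys); B raises there too.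
def Pre_solution_1542_5 (nums : List Int) : Prop := nums ≠ []
instance (nums : List Int) : Decidable (Pre_solution_1542_5 nums) := by unfold Pre_solution_1542_5; infer_instance
def pvWitness_solution_1542_5 : List Int := [3, -3, -1, 1, -5]

def Spec_solution_1542_5 (nums : List Int) (out : Int) : Prop := out = solution_1542_5_alt nums
instance (nums : List Int) (out : Int) : Decidable (Spec_solution_1542_5 nums out) := by unfold Spec_solution_1542_5; infer_instance

-- ===== CLAIM (what is proved, stated in full; the proofs are below) =====
def Claim_equal_solution_1542_5 : Prop := ∀ (nums : List Int), Dom_solution_1542_5 nums → Pre_solution_1542_5 nums → Spec_solution_1542_5 nums (solution_1542_5 nums)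

-- ===== LEMMAS AND PROOFS =====

-- optional max of a list, as A's loop accumulates it
def pvOmax (xs : List Int) : Option Int :=
  match xs with
  | [] => none
  | h :: t => some (t.foldl max h)

def pvCombine (a b : Option Int) : Option Int :=
  match a, b with
  | none, b => b
  | some a, none => some a
  | some a, some b => some (max a b)

theorem pvFoldlMaxPull (l : List Int) (a b : Int) :
    l.foldl max (max a b) = max a (l.foldl max b) := by
  induction l generalizing b with
  | nil => simp
  | cons x t ih => simp only [List.foldl_cons, max_assoc]; exact ih (max b x)

theorem pvFoldGet (l : List Int) (d : PySem.Dict Int Int) (k : Int) :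
    (l.foldl pvStep d).get? k
      = pvCombine (d.get? k) (pvOmax (l.filter (fun x => |x| == k))) := by
  induction l generalizing d with
  | nil => cases h : d.get? k <;> simp [pvOmax, pvCombine, h]
  | cons v t ih =>
    simp only [List.foldl_cons, List.filter_cons]
    by_cases hk : |v| = k
    · subst hk
      rw [ih]
      have hstep : (pvStep d v).get? |v|
          = some (match d.get? |v| with | none => v | some w => max w v) := by
        unfold pvStep
        by_cases hc : d.contains |v| = true
        · rw [if_pos hc, PySem.Dict.get?_insert_self]
          have := PySem.Dict.contains_eq_isSome_get? d |v|
          cases hg : d.get? |v| with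
          | none => rw [hg] at this; simp [hc] at this
          | some w => simp [PySem.Dict.getD_eq_get?_getD, hg]
        · rw [if_neg hc, PySem.Dict.get?_insert_self]
          have := PySem.Dict.contains_eq_isSome_get? d |v|
          cases hg : d.get? |v| with
          | none => simp
          | some w => rw [hg] at this; simp [this] at hc
      rw [hstep]
      simp only [BEq.rfl, if_pos]
      cases hg : d.get? |v| with
      | none =>
        cases hf : t.filter (fun x => |x| == |v|) with
        | nil => simp [pvOmax, pvCombine]
        | cons h2 t2 => simp [pvOmax, pvCombine, pvFoldlMaxPull]
      | some w =>
        cases hf : t.filter (fun x => |x| == |v|) with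
        | nil => simp [pvOmax, pvCombine]
        | cons h2 t2 =>
          simp only [pvOmax, pvCombine, Option.some.injEq, List.foldl_cons]
          rw [pvFoldlMaxPull t2 v h2, max_assoc]
    · have hne : ((|v| == k) = false) := by simp [hk]
      have hstep : (pvStep d v).get? k = d.get? k := by
        unfold pvStep
        split <;> exact PySem.Dict.get?_insert_of_ne _ _ (fun h => hk h.symm)
      rw [ih, hstep, hne]
      simp

theorem pvMinCongr (xs ys : List Int) (h : ∀ a, a ∈ xs ↔ a ∈ ys) :
    PySem.List.min? xs (fun y => y) = PySem.List.min? ys (fun y => y) := by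
  cases hx : PySem.List.min? xs (fun y => y) with
  | none =>
    rw [PySem.List.min?_eq_none_iff] at hx
    subst hx
    rw [eq_comm, PySem.List.min?_eq_none_iff]
    cases hy : ys with
    | nil => rfl
    | cons b t => exact absurd ((h b).2 (by simp [hy])) (by simp)
  | some a =>
    have hax : a ∈ xs := PySem.List.min?_mem hx
    cases hy : PySem.List.min? ys (fun y => y) with
    | none =>
      rw [PySem.List.min?_eq_none_iff] at hy
      subst hy
      exact absurd ((h a).1 hax) (by simp)
    | some b =>
      have hby : b ∈ ys := PySem.List.min?_mem hy
      have h1 := PySem.List.min?_isMin hx b ((h b).2 hby)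
      have h2 := PySem.List.min?_isMin hy a ((h a).1 hax)
      simp only [Option.some.injEq]
      exact le_antisymm h1 h2

theorem pvOmaxEqMax (xs : List Int) :
    pvOmax xs = PySem.List.max? xs (fun y => y) := by
  cases xs with
  | nil =>
    have h : PySem.List.max? ([] : List Int) (fun y => y) = none := by
      rw [PySem.List.max?_eq_none_iff]
    rw [h]; rfl
  | cons h t => rw [PySem.List.max?_id_cons]; rfl

-- ===== VERDICT (by name: the statement is the Claim_ definition above) =====
theorem solution_1542_5_spec : Claim_equal_solution_1542_5 := by
  intro nums _ hne
  unfold Spec_solution_1542_5 solution_1542_5 solution_1542_5_alt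
  rw [PySem.List.foldl_pyRange_zero_pyGetD' nums 0 pvStep PySem.Dict.empty]
  set f := nums.foldl pvStep PySem.Dict.empty with hf
  have hget : ∀ k, f.get? k = pvOmax (nums.filter (fun x => |x| == k)) := by
    intro k
    rw [hf, pvFoldGet]
    simp [pvCombine]
  -- keys of f have the same members as nums.map abs
  have hmem : ∀ k, k ∈ f.keys ↔ k ∈ nums.map (fun x => |x|) := by
    intro k
    constructor
    · intro hk
      by_contra hnk
      have hfe : nums.filter (fun x => |x| == k) = [] := by
        rw [List.filter_eq_nil_iff]
        intro x hx hxk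
        exact hnk (by simp at hxk ⊢; exact ⟨x, hx, hxk⟩)
      have := hget k
      rw [hfe] at this
      exact (PySem.Dict.get?_eq_none_iff_not_mem_keys f k).1 this hk
    · intro hk
      simp only [List.mem_map] at hk
      obtain ⟨x, hx, hxk⟩ := hk
      by_contra hnk
      have := (PySem.Dict.get?_eq_none_iff_not_mem_keys f k).2 hnk
      rw [hget k] at this
      cases hfe : nums.filter (fun y => |y| == k) with
      | nil =>
        rw [List.filter_eq_nil_iff] at hfe
        exact hfe x hx (by simp [hxk])
      | cons a b => rw [hfe] at this; simp [pvOmax] at this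
  have hkeys : PySem.List.min? f.keys (fun y => y)
      = PySem.List.min? (nums.map (fun x => |x|)) (fun y => y) := pvMinCongr _ _ hmem
  show f.getD ((PySem.List.min? f.keys (fun y => y)).getD 0) 0
      = (PySem.List.max? (nums.filter (fun x =>
          |x| == (PySem.List.min? (nums.map (fun x => |x|)) (fun y => y)).getD 0))
          (fun y => y)).getD 0
  rw [hkeys]
  rw [PySem.Dict.getD_eq_get?_getD, hget, pvOmaxEqMax]
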